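-- pv_equiv track=rewrite | github.com/hoonkiyeo/codetree-TILs | 231219/최소 와이파이 수/minimum-number-of-wifi.py | min_wifi
-- ===== SOURCE A (Python) =====
-- def min_wifi(n, m, houses):
--     i = 0
--     wifi_count = 0
--
--     while i < n:
--         if houses[i] == 1:
--             # 와이파이를 설치할 위치 찾기
--             wifi_pos = min(i + m, n - 1)
--             wifi_count += 1
--
--             # 와이파이가 커버하는 마지막 위치 찾기
--             i = wifi_pos + m + 1
--         else:
--             i += 1
--
--     return wifi_count
-- ===== SOURCE B (Python) =====
-- def _first_greater(a, x, lo):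
--     # smallest index idx with lo <= idx <= len(a) such that a[idx] > x
--     # (a is sorted ascending); hand-written binary search (bisect_right).
--     hi = len(a)
--     while lo < hi:
--         mid = (lo + hi) // 2
--         if a[mid] <= x:
--             lo = mid + 1
--         else:
--             hi = mid
--     return lo
--
--
-- def min_wifi(n, m, houses):
--     positions = [j for j in range(n) if houses[j] == 1]
--     count = 0
--     idx = 0
--     while idx < len(positions):
--         p = positions[idx]
--         count += 1
--         idx = _first_greater(positions, min(p + m, n - 1) + m, idx + 1)
--     return count
-- ===== Notes on version B (the rewrite author's own statement) =====
-- stated objective: alternative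
-- what changed: A scans every index with a jumping while loop; B first compresses the input to the sorted list of house positions and then loops only over the chosen wifi placements, locating each next uncovered house with a hand-written binary search (bisect_right) instead of any linear skipping.
-- outside the precondition, e.g. on min_wifi(5, 10, [1, 0, 0]): A returns 1, B raises IndexError
import Mathlib
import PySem

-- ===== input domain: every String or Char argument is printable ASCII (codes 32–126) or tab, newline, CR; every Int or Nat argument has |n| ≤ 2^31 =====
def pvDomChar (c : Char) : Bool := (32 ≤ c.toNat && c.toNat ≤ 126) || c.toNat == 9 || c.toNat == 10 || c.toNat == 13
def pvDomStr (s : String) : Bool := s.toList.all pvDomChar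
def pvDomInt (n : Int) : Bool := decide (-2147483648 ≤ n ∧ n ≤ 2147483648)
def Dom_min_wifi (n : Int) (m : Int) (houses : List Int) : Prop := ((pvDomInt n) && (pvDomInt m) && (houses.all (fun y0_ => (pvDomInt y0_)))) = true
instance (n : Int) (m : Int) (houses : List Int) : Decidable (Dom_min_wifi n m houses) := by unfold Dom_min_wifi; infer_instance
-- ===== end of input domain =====

-- B compresses the input to the sorted list of house positions and then loops only over the
-- chosen wifi placements, finding each next uncovered house by binary search; objective:
-- alternative (same dominant O(n) cost; return value only).

-- ===== PORT A =====
-- while-loop of A as fuelled recursion on the loop counter i; fuel n.toNat suffices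
-- under Pre_ (m >= 0 makes i strictly increase). 'none' branch = IndexError, outside Pre_.
def pvA_loop (n : Int) (m : Int) (houses : List Int) (fuel : Nat) (i : Int) (wifi_count : Int) : Int :=
  match fuel with
  | 0 => wifi_count
  | fuel + 1 =>
    if i < n then
      match PySem.List.pyGet? houses i with
      | some h =>
        if h = 1 then
          let wifi_pos := min (i + m) (n - 1)
          pvA_loop n m houses fuel (wifi_pos + m + 1) (wifi_count + 1)
        else
          pvA_loop n m houses fuel (i + 1) wifi_count
      | none => wifi_count
    else wifi_count

def min_wifi (n : Int) (m : Int) (houses : List Int) : Int :=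
  pvA_loop n m houses n.toNat 0 0

-- ===== PORT B =====
-- _first_greater of Source B: binary search (bisect_right) for the smallest index >= lo with
-- a[idx] > x. Every call has lo < hi <= a.length, so a[mid] is always in range; the getD
-- default is never used (exact on all admitted inputs).
def pvFirstGreater (a : List Int) (x : Int) (lo hi : Nat) : Nat :=
  if _h : lo < hi then
    if a.getD ((lo + hi) / 2) 0 ≤ x then pvFirstGreater a x ((lo + hi) / 2 + 1) hi
    else pvFirstGreater a x lo ((lo + hi) / 2)
  else lo
termination_by hi - lo
decreasing_by all_goals omega

-- Source B's while loop over the selected wifi placements; fuel positions.length suffices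
-- since idx strictly increases each round (pvFirstGreater returns at least lo).
def pvB_loop (n : Int) (m : Int) (positions : List Int) (fuel : Nat) (idx : Nat) (count : Int) : Int :=
  match fuel with
  | 0 => count
  | fuel + 1 =>
    if idx < positions.length then
      let p := positions.getD idx 0
      let idx' := pvFirstGreater positions (min (p + m) (n - 1) + m) (idx + 1) positions.length
      pvB_loop n m positions fuel idx' (count + 1)
    else count

def min_wifi_alt (n : Int) (m : Int) (houses : List Int) : Int :=
  let positions := (PySem.List.pyRange 0 n 1).filter
      (fun j => PySem.List.pyGet? houses j == some 1)
  pvB_loop n m positions positions.length 0 0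

-- ===== PRECONDITION & SPEC =====
-- Pre_ excludes (a) n > len(houses), where A usually raises IndexError and returns only
-- accidentally when a jump skips the missing tail (B raises there), and (b) m < 0 with some
-- house among the first n positions, where A's while loop never terminates (or walks off the
-- left end and raises); m < 0 with no such house is admitted (A returns 0).
def Pre_min_wifi (n : Int) (m : Int) (houses : List Int) : Prop :=
  n ≤ (houses.length : Int) ∧
    (0 ≤ m ∨
      ((PySem.List.pyRange 0 n 1).all
        (fun j => !(PySem.List.pyGet? houses j == some 1))) = true)
instance (n : Int) (m : Int) (houses : List Int) : Decidable (Pre_min_wifi n m houses) := by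
  unfold Pre_min_wifi; infer_instance
def pvWitness_min_wifi : Int × Int × List Int := (5, 1, [1, 0, 1, 0, 1])

def Spec_min_wifi (n : Int) (m : Int) (houses : List Int) (out : Int) : Prop := out = min_wifi_alt n m houses
instance (n : Int) (m : Int) (houses : List Int) (out : Int) : Decidable (Spec_min_wifi n m houses out) := by unfold Spec_min_wifi; infer_instance

-- ===== CLAIM (what is proved, stated in full; the proofs are below) =====
def Claim_equal_min_wifi : Prop := ∀ (n : Int) (m : Int) (houses : List Int), Dom_min_wifi n m houses → Pre_min_wifi n m houses → Spec_min_wifi n m houses (min_wifi n m houses)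

-- ===== LEMMAS AND PROOFS =====

-- proof-side reference greedy: one fold step over a house position, keeping (covered_until, count)
def pvB_step (n : Int) (m : Int) (st : Int × Int) (p : Int) : Int × Int :=
  if st.1 < p then (min (p + m) (n - 1) + m, st.2 + 1) else st

-- a fold of pvB_step over positions that are all already covered leaves the state unchanged
theorem pvB_skip (n m : Int) (ps : List Int) (c k : Int) (h : ∀ p ∈ ps, p ≤ c) :
    ps.foldl (pvB_step n m) (c, k) = (c, k) := by
  induction ps with
  | nil => rfl
  | cons p ps ih =>
    have hp : p ≤ c := h p (by simp)
    simp only [List.foldl_cons, pvB_step, if_neg (by omega : ¬ c < p)]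
    exact ih (fun q hq => h q (by simp [hq]))

-- A-side invariant: A's loop from index i equals the reference fold over the remaining
-- positions, for any covered_until c < i
theorem pvAB_loop (n m : Int) (houses : List Int) (fuel : Nat) :
    ∀ (i c k : Int), n ≤ (houses.length : Int) → 0 ≤ m → 0 ≤ i → c < i →
      (n - i).toNat ≤ fuel →
      pvA_loop n m houses fuel i k =
        (((PySem.List.pyRange i n 1).filter
            (fun j => PySem.List.pyGet? houses j == some 1)).foldl (pvB_step n m) (c, k)).2 := by
  induction fuel with
  | zero =>
    intro i c k hlen hm hi hc hf
    have hni : n ≤ i := by omega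
    simp [pvA_loop, PySem.List.pyRange_one_eq_nil hni]
  | succ fuel ih =>
    intro i c k hlen hm hi hc hf
    by_cases hin : i < n
    · have hib : i < (houses.length : Int) := by omega
      have hget := PySem.List.pyGet?_eq_some_getElem (xs := houses) hi hib
      rw [PySem.List.pyRange_one_cons hin, List.filter_cons]
      by_cases h1 : houses[i.toNat]'(by omega) = 1
      · have hpred : ((PySem.List.pyGet? houses i == some 1) = true) := by
          simp [hget, h1]
        simp only [if_pos hpred, List.foldl_cons, pvB_step, if_pos hc]
        simp only [pvA_loop, if_pos hin, hget, if_pos h1]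
        set c' : Int := min (i + m) (n - 1) + m with hc'
        have hii : i + 1 ≤ c' + 1 := by
          have : i ≤ min (i + m) (n - 1) := by omega
          omega
        by_cases hlt : c' + 1 ≤ n
        · rw [PySem.List.pyRange_one_append (i + 1) (c' + 1) n (by omega) hlt,
              List.filter_append, List.foldl_append]
          rw [pvB_skip n m _ c' (k + 1) (fun p hp => by
            have := (PySem.List.mem_pyRange_one.mp (List.mem_of_mem_filter hp)).2
            omega)]
          exact ih (c' + 1) c' (k + 1) hlen hm (by omega) (by omega) (by omega)
        · rw [pvB_skip n m _ c' (k + 1) (fun p hp => by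
            have := (PySem.List.mem_pyRange_one.mp (List.mem_of_mem_filter hp)).2
            omega)]
          cases fuel with
          | zero => rfl
          | succ fuel' =>
            show (if c' + 1 < n then _ else k + 1) = k + 1
            rw [if_neg (by omega : ¬ c' + 1 < n)]
      · have hpred : ¬ ((PySem.List.pyGet? houses i == some 1) = true) := by
          simp [hget, h1]
        simp only [if_neg hpred]
        simp only [pvA_loop, if_pos hin, hget, if_neg h1]
        exact ih (i + 1) c k hlen hm (by omega) (by omega) (by omega)
    · simp [pvA_loop, hin, PySem.List.pyRange_one_eq_nil (by omega : n ≤ i)]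

-- with no house among the first n positions A's loop just counts i up and returns 0
theorem pvA_nohouse (n m : Int) (houses : List Int)
    (hno : ∀ j ∈ PySem.List.pyRange 0 n 1, ¬((PySem.List.pyGet? houses j == some 1) = true))
    (hlen : n ≤ (houses.length : Int)) :
    ∀ (fuel : Nat) (i k : Int), 0 ≤ i → (n - i).toNat ≤ fuel →
      pvA_loop n m houses fuel i k = k := by
  intro fuel
  induction fuel with
  | zero => intro i k hi hf; rfl
  | succ fuel ih =>
    intro i k hi hf
    by_cases hin : i < n
    · have hget := PySem.List.pyGet?_eq_some_getElem (xs := houses) hi (by omega)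
      have hne : ¬ houses[i.toNat]'(by omega) = 1 := by
        have := hno i (PySem.List.mem_pyRange_one.mpr ⟨hi, hin⟩)
        simp [hget] at this
        exact this
      simp only [pvA_loop, if_pos hin, hget, if_neg hne]
      exact ih (i + 1) k (by omega) (by omega)
    · simp [pvA_loop, hin]

theorem pvFG_ge (a : List Int) (x : Int) (lo hi : Nat) : lo ≤ pvFirstGreater a x lo hi := by
  rw [pvFirstGreater]
  split
  · split
    · have := pvFG_ge a x ((lo + hi) / 2 + 1) hi
      omega
    · exact pvFG_ge a x lo ((lo + hi) / 2)
  · exact le_rfl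
termination_by hi - lo
decreasing_by all_goals omega

-- binary-search correctness on a sorted list: the result r lies in [lo, hi],
-- everything in [lo, r) is ≤ x, and a[r] > x whenever r < a.length (taking hi = a.length)
theorem pvFG_spec (a : List Int) (x : Int) (hsort : a.Pairwise (· ≤ ·)) :
    ∀ (lo hi : Nat), lo ≤ hi → hi ≤ a.length →
      (∀ (i : Nat) (h : i < a.length), hi ≤ i → x < a[i]) →
      (pvFirstGreater a x lo hi ≤ hi ∧
       (∀ (i : Nat) (h : i < a.length), lo ≤ i → i < pvFirstGreater a x lo hi → a[i] ≤ x) ∧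
       (pvFirstGreater a x lo hi < a.length → x < a.getD (pvFirstGreater a x lo hi) 0)) := by
  have hmono : ∀ (i j : Nat) (hi : i < a.length) (hj : j < a.length), i ≤ j → a[i] ≤ a[j] := by
    intro i j hi hj hij
    rcases Nat.lt_or_ge i j with h | h
    · exact List.pairwise_iff_getElem.mp hsort i j hi hj h
    · have : i = j := by omega
      subst this; exact le_rfl
  suffices H : ∀ (d lo hi : Nat), hi - lo ≤ d → lo ≤ hi → hi ≤ a.length →
      (∀ (i : Nat) (h : i < a.length), hi ≤ i → x < a[i]) →
      (pvFirstGreater a x lo hi ≤ hi ∧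
       (∀ (i : Nat) (h : i < a.length), lo ≤ i → i < pvFirstGreater a x lo hi → a[i] ≤ x) ∧
       (pvFirstGreater a x lo hi < a.length → x < a.getD (pvFirstGreater a x lo hi) 0)) by
    intro lo hi
    exact H (hi - lo) lo hi le_rfl
  intro d
  induction d with
  | zero =>
    intro lo hi hd hlohi hhil hinv
    have hlo : lo = hi := by omega
    have heq : pvFirstGreater a x lo hi = lo := by
      rw [pvFirstGreater, dif_neg (by omega : ¬ lo < hi)]
    rw [heq]
    refine ⟨le_of_eq hlo, fun i _ h1 h2 => by omega, fun hlt => ?_⟩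
    have : a.getD lo 0 = a[lo] := by
      simp [List.getD_eq_getElem?_getD, List.getElem?_eq_getElem hlt]
    rw [this]
    exact hinv lo hlt (by omega)
  | succ d ih =>
  intro lo hi hd hlohi hhil hinv
  by_cases h : lo < hi
  · have hmidlt : (lo + hi) / 2 < a.length := by omega
    have hgetd : a.getD ((lo + hi) / 2) 0 = a[(lo + hi) / 2] := by
      simp [List.getD_eq_getElem?_getD, List.getElem?_eq_getElem hmidlt]
    by_cases hle : a.getD ((lo + hi) / 2) 0 ≤ x
    · have heq : pvFirstGreater a x lo hi = pvFirstGreater a x ((lo + hi) / 2 + 1) hi := by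
        conv_lhs => rw [pvFirstGreater]
        rw [dif_pos h, if_pos hle]
      rw [heq]
      obtain ⟨h1, h2, h3⟩ := ih ((lo + hi) / 2 + 1) hi (by omega) (by omega) hhil hinv
      refine ⟨h1, ?_, h3⟩
      intro i hilen hloi hir
      by_cases hcase : (lo + hi) / 2 + 1 ≤ i
      · exact h2 i hilen hcase hir
      · calc a[i] ≤ a[(lo + hi) / 2] := hmono i _ hilen hmidlt (by omega)
          _ ≤ x := by rw [hgetd] at hle; exact hle
    · have heq : pvFirstGreater a x lo hi = pvFirstGreater a x lo ((lo + hi) / 2) := by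
        conv_lhs => rw [pvFirstGreater]
        rw [dif_pos h, if_neg hle]
      rw [heq]
      rw [hgetd] at hle
      rw [not_le] at hle
      obtain ⟨h1, h2, h3⟩ := ih lo ((lo + hi) / 2) (by omega) (by omega) (by omega)
        (fun i hilen hgei => lt_of_lt_of_le hle (hmono _ i hmidlt hilen hgei))
      exact ⟨by omega, h2, h3⟩
  · have heq : pvFirstGreater a x lo hi = lo := by
      rw [pvFirstGreater, dif_neg h]
    rw [heq]
    refine ⟨by omega, fun i _ h1 h2 => by omega, fun hlt => ?_⟩
    have : a.getD lo 0 = a[lo] := by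
      simp [List.getD_eq_getElem?_getD, List.getElem?_eq_getElem hlt]
    rw [this]
    exact hinv lo hlt (by omega)

-- B-side invariant: Source B's binary-search loop from index idx equals the reference fold
-- over the remaining positions, for any covered_until c below every remaining position
theorem pvB_loop_eq_fold (n m : Int) (ps : List Int) (hsort : ps.Pairwise (· ≤ ·)) :
    ∀ (fuel idx : Nat) (c k : Int), ps.length - idx ≤ fuel →
      (∀ (i : Nat) (h : i < ps.length), idx ≤ i → c < ps[i]) →
      pvB_loop n m ps fuel idx k = ((ps.drop idx).foldl (pvB_step n m) (c, k)).2 := by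
  intro fuel
  induction fuel with
  | zero =>
    intro idx c k hf hinv
    have : ps.length ≤ idx := by omega
    simp [pvB_loop, List.drop_eq_nil_of_le this]
  | succ fuel ih =>
    intro idx c k hf hinv
    by_cases hidx : idx < ps.length
    · have hgetd : ps.getD idx 0 = ps[idx] := by
        simp [List.getD_eq_getElem?_getD, List.getElem?_eq_getElem hidx]
      have hdrop : ps.drop idx = ps[idx] :: ps.drop (idx + 1) :=
        List.drop_eq_getElem_cons hidx
      have hc : c < ps[idx] := hinv idx hidx le_rfl
      simp only [pvB_loop, if_pos hidx, hgetd]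
      set c' : Int := min (ps[idx] + m) (n - 1) + m with hc'
      set r : Nat := pvFirstGreater ps c' (idx + 1) ps.length with hr
      obtain ⟨hrle, hmid, hafter⟩ := pvFG_spec ps c' hsort (idx + 1) ps.length
        (by omega) le_rfl (fun i h h2 => by omega)
      have hrge : idx + 1 ≤ r := pvFG_ge ps c' (idx + 1) ps.length
      have hdl : (ps.drop (idx + 1)).length = ps.length - (idx + 1) := by
        simp
      rw [hdrop, List.foldl_cons]
      simp only [pvB_step, if_pos hc]
      have hdd : (ps.drop (idx + 1)).drop (r - (idx + 1)) = ps.drop r := by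
        rw [List.drop_drop]
        congr 1
        omega
      have hsplit : ps.drop (idx + 1) =
          (ps.drop (idx + 1)).take (r - (idx + 1)) ++ ps.drop r := by
        rw [← hdd, List.take_append_drop]
      rw [hsplit, List.foldl_append]
      rw [pvB_skip n m _ c' (k + 1) (fun p hp => by
        obtain ⟨t, ht, hpt⟩ := List.mem_iff_getElem.mp hp
        have ht2 : t < min (r - (idx + 1)) (ps.drop (idx + 1)).length := by
          simpa [List.length_take] using ht
        have htr : t < r - (idx + 1) := by omega
        have hidx1t : idx + 1 + t < ps.length := by omega
        have hpe : p = ps[idx + 1 + t] := by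
          rw [← hpt]
          simp [List.getElem_take, List.getElem_drop]
        rw [hpe]
        exact hmid (idx + 1 + t) hidx1t (by omega) (by omega))]
      have hafter' : ∀ (h : r < ps.length), c' < ps[r] := by
        intro h
        have := hafter h
        have hg : ps.getD r 0 = ps[r] := by
          simp [List.getD_eq_getElem?_getD, List.getElem?_eq_getElem h]
        rwa [hg] at this
      exact ih r c' (k + 1) (by omega) (fun i h hri => by
        rcases Nat.eq_or_lt_of_le hri with heq | hlt
        · subst heq; exact hafter' h
        · have hrlen : r < ps.length := by omega
          calc c' < ps[r] := hafter' hrlen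
            _ ≤ ps[i] := List.pairwise_iff_getElem.mp hsort r i hrlen h hlt)
    · have : ps.length ≤ idx := by omega
      simp [pvB_loop, hidx, List.drop_eq_nil_of_le this]

-- the position list is sorted and nonnegative
theorem pv_positions_sorted (n : Int) (houses : List Int) :
    ((PySem.List.pyRange 0 n 1).filter
      (fun j => PySem.List.pyGet? houses j == some 1)).Pairwise (· ≤ ·) :=
  ((PySem.List.pairwise_lt_pyRange_one 0 n).filter _).imp (fun h => le_of_lt h)

-- B equals the reference fold over the position list starting from (-1, 0)
theorem pvB_eq_fold (n m : Int) (houses : List Int) :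
    min_wifi_alt n m houses =
      (((PySem.List.pyRange 0 n 1).filter
          (fun j => PySem.List.pyGet? houses j == some 1)).foldl (pvB_step n m) (-1, 0)).2 := by
  unfold min_wifi_alt
  set ps := (PySem.List.pyRange 0 n 1).filter
      (fun j => PySem.List.pyGet? houses j == some 1) with hps
  have := pvB_loop_eq_fold n m ps (pv_positions_sorted n houses) ps.length 0 (-1) 0
    (by omega) (fun i h _ => by
      have hmem : ps[i] ∈ ps := List.getElem_mem h
      have : ps[i] ∈ PySem.List.pyRange 0 n 1 := List.mem_of_mem_filter hmem
      have := (PySem.List.mem_pyRange_one.mp this).1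
      omega)
  simpa using this

-- ===== VERDICT (by name: the statement is the Claim_ definition above) =====
theorem min_wifi_spec : Claim_equal_min_wifi := by
  intro n m houses _ hpre
  unfold Spec_min_wifi min_wifi
  rw [pvB_eq_fold]
  rcases hpre with ⟨hlen, hm | hno⟩
  · exact pvAB_loop n m houses n.toNat 0 (-1) 0 hlen hm le_rfl (by omega) (by omega)
  · rw [List.all_eq_true] at hno
    have hfil : (PySem.List.pyRange 0 n 1).filter
        (fun j => PySem.List.pyGet? houses j == some 1) = [] := by
      rw [List.filter_eq_nil_iff]
      intro j hj
      have := hno j hj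
      simpa using this
    rw [pvA_nohouse n m houses (fun j hj => by simpa using hno j hj) hlen n.toNat 0 0
        le_rfl (by omega)]
    simp [hfil]
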